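-- pv_equiv track=rewrite | github.com/DenizAvaroglu/Mistik_Sifreleme | ŞifrelemeHVS.py | bir_son_bir_bas_tersi
-- ===== SOURCE A (Python) =====
-- def bir_son_bir_bas_tersi(metin):
--     """Bir son bir baş işlemini tersine çevirir"""
--     if len(metin) <= 1:
--         return metin
--
--     # Sonuç metnini oluştur
--     sonuc = [''] * len(metin)
--
--     # Bir son bir baş şeklinde olan metni tekrar aslına çevir
--     for i in range(0, len(metin), 2):
--         # Çift indeksler = son karakterler
--         if i < len(metin):
--             # Sondaki karakter
--             sonuc[len(metin) - 1 - (i // 2)] = metin[i]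
--
--         # Tek indeksler = baş karakterler
--         if i + 1 < len(metin):
--             sonuc[i // 2] = metin[i + 1]
--
--     # Tek sayıda karakter varsa, ortadaki karakteri ayarla
--     if len(metin) % 2 == 1:
--         orta_index = len(metin) // 2
--         sonuc[orta_index] = metin[len(metin) - 1]
--
--     return ''.join(sonuc)
-- ===== SOURCE B (Python) =====
-- def bir_son_bir_bas_tersi(metin):
--     """Bir son bir bas islemini tersine cevirir (kapali form: dilimler)."""
--     return metin[1::2] + metin[0::2][::-1]
-- ===== Notes on version B (the rewrite author's own statement) =====
-- stated objective: simpler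
-- what changed: The index-by-index scatter loop into a preallocated buffer (plus the odd-length middle patch) is replaced by a single closed-form slice expression: the odd-indexed characters followed by the reversed even-indexed characters.
import Mathlib
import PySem

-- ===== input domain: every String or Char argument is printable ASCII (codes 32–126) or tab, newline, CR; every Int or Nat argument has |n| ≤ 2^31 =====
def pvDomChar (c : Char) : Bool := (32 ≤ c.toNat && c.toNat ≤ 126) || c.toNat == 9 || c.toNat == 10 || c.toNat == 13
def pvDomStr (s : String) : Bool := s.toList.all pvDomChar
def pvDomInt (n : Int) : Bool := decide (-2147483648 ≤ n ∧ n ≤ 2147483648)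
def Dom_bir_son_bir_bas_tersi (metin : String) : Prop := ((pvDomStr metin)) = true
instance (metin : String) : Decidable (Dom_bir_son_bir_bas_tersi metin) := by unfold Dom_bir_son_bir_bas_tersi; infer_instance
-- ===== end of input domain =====

-- B replaces A's index-by-index scatter loop (plus odd-length middle patch) by the closed-form
-- slice expression metin[1::2] + metin[0::2][::-1] (simpler; same asymptotic cost).

-- ===== PORT A =====
def bir_son_bir_bas_tersi (metin : String) : String :=
  if PySem.Str.len metin ≤ 1 then metin
  else
    let n : Int := PySem.Str.len metin
    -- sonuc = [''] * len(metin)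
    let sonuc0 : List String := List.replicate n.toNat ""
    -- for i in range(0, len(metin), 2): two guarded writes (all indices are in range, so pySetD is exact)
    let body : List String → Int → List String := fun s i =>
      let s1 := if i < n then
          PySem.List.pySetD s (n - 1 - PySem.Int.floordiv i 2)
            (((PySem.Str.pyGet? metin i).map (fun c => String.ofList [c])).getD "")
        else s
      if i + 1 < n then
          PySem.List.pySetD s1 (PySem.Int.floordiv i 2)
            (((PySem.Str.pyGet? metin (i+1)).map (fun c => String.ofList [c])).getD "")
        else s1
    let sonuc1 := (PySem.List.pyRange 0 n 2).foldl body sonuc0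
    -- if len(metin) % 2 == 1: sonuc[orta_index] = metin[len(metin) - 1]
    let sonuc2 := if PySem.Int.mod n 2 = 1 then
        PySem.List.pySetD sonuc1 (PySem.Int.floordiv n 2)
          (((PySem.Str.pyGet? metin (n-1)).map (fun c => String.ofList [c])).getD "")
      else sonuc1
    PySem.Str.join "" sonuc2

-- ===== PORT B =====
-- metin[1::2] + metin[0::2][::-1]; steps 2 and -1 are nonzero, so slice? never returns none and getD "" is unreachable
def bir_son_bir_bas_tersi_alt (metin : String) : String :=
  ((PySem.Str.slice? metin (some 1) none 2).getD "")
    ++ ((PySem.Str.slice? ((PySem.Str.slice? metin (some 0) none 2).getD "") none none (-1)).getD "")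

-- ===== PRECONDITION & SPEC =====
def Spec_bir_son_bir_bas_tersi (metin : String) (out : String) : Prop := out = bir_son_bir_bas_tersi_alt metin
instance (metin : String) (out : String) : Decidable (Spec_bir_son_bir_bas_tersi metin out) := by unfold Spec_bir_son_bir_bas_tersi; infer_instance

-- ===== CLAIM (what is proved, stated in full; the proofs are below) =====
def Claim_equal_bir_son_bir_bas_tersi : Prop := ∀ (metin : String), Dom_bir_son_bir_bas_tersi metin → Spec_bir_son_bir_bas_tersi metin (bir_son_bir_bas_tersi metin)

-- ===== LEMMAS AND PROOFS =====

-- the odd-indexed characters of cs (front of the result) and the even-indexed characters (back, reversed)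
def pvOdds (cs : List Char) : List Char :=
  (List.range (cs.length / 2)).map (fun j => cs.getD (2*j+1) default)
def pvEvens (cs : List Char) : List Char :=
  (List.range ((cs.length + 1) / 2)).map (fun j => cs.getD (2*j) default)

theorem pv_filterMap_getElem?_eq_map (xs : List Char) (g : Nat → Nat) (cnt : Nat)
    (h : ∀ k < cnt, g k < xs.length) :
    (List.range cnt).filterMap (fun k => xs[g k]?) =
      (List.range cnt).map (fun k => xs.getD (g k) default) := by
  induction cnt with
  | zero => simp
  | succ m ih =>
    rw [List.range_succ, List.filterMap_append, List.map_append,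
      ih (fun k hk => h k (Nat.lt_succ_of_lt hk))]
    have hm := h m (Nat.lt_succ_self m)
    simp [List.getElem?_eq_getElem hm]

-- characterization of the step-2 slice from a nonnegative start (any start; past-the-end gives [])
theorem pv_slice2 (cs : List Char) (a : Nat) :
    PySem.List.slice? cs (some (a : Int)) none 2 =
      some ((List.range ((cs.length - a + 1) / 2)).map (fun k => cs.getD (a + 2*k) default)) := by
  unfold PySem.List.slice? PySem.List.sliceIndices
  have h2 : ¬ ((2:Int) = 0) := by norm_num
  have h2n : ¬ ((2:Int) < 0) := by norm_num
  have han : ¬ ((a:Int) < 0) := by exact_mod_cast Int.not_lt.mpr (Int.natCast_nonneg a)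
  simp only [if_neg h2, if_neg h2n, if_neg han]
  by_cases ha : a ≤ cs.length
  · have hale : ((a:Int) ≤ (cs.length:Int)) := by exact_mod_cast ha
    simp only [min_eq_left hale]
    have hcnt : (if (a:Int) < (cs.length:Int) then (((cs.length:Int) - a + 2 - 1) / 2).toNat else 0)
        = (cs.length - a + 1) / 2 := by
      split_ifs with hl <;> omega
    rw [hcnt]
    have harg : (fun k : Nat => cs[((a:Int) + 2 * (k:Int)).toNat]?) = (fun k : Nat => cs[a + 2*k]?) := by
      funext k
      have h3 : ((a:Int) + 2 * (k:Int)).toNat = a + 2*k := by omega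
      rw [h3]
    rw [harg]
    exact congrArg some (pv_filterMap_getElem?_eq_map cs (fun k => a + 2*k) ((cs.length - a + 1) / 2)
      (fun k hk => by show a + 2*k < cs.length; omega))
  · have hgt : ((cs.length:Int) ≤ (a:Int)) := by exact_mod_cast (by omega : cs.length ≤ a)
    simp only [min_eq_right hgt]
    rw [if_neg (by omega : ¬ ((cs.length:Int) < (cs.length:Int)))]
    have hz : (cs.length - a + 1) / 2 = 0 := by omega
    rw [hz]
    simp

theorem pv_alt_toList (metin : String) :
    (bir_son_bir_bas_tersi_alt metin).toList = pvOdds metin.toList ++ (pvEvens metin.toList).reverse := by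
  have e1 : PySem.Str.slice? metin (some 1) none 2 = some (String.ofList (pvOdds metin.toList)) := by
    simp only [PySem.Str.slice?, PySem.Chars.slice?_eq_listSlice?]
    have h1 := pv_slice2 metin.toList 1
    rw [Nat.cast_one] at h1
    rw [h1]
    unfold pvOdds
    have hc : (metin.toList.length - 1 + 1) / 2 = metin.toList.length / 2 := by omega
    have hf : (fun k : Nat => metin.toList.getD (1 + 2*k) default)
        = (fun j : Nat => metin.toList.getD (2*j+1) default) := by
      funext k; congr 1; omega
    rw [hc, hf]
    rfl
  have e0 : PySem.Str.slice? metin (some 0) none 2 = some (String.ofList (pvEvens metin.toList)) := by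
    simp only [PySem.Str.slice?, PySem.Chars.slice?_eq_listSlice?]
    have h0 := pv_slice2 metin.toList 0
    rw [Nat.cast_zero] at h0
    rw [h0]
    unfold pvEvens
    have hc : metin.toList.length - 0 + 1 = metin.toList.length + 1 := by omega
    have hf : (fun k : Nat => metin.toList.getD (0 + 2*k) default)
        = (fun j : Nat => metin.toList.getD (2*j) default) := by
      funext k; congr 1; omega
    rw [hc, hf]
    rfl
  unfold bir_son_bir_bas_tersi_alt
  rw [e1, e0]
  simp only [Option.getD_some]
  rw [PySem.Str.slice?_none_none_neg_one]
  simp only [Option.getD_some, String.toList_append, String.toList_ofList]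

-- expected final cell value of A at position j (for 2 ≤ n)
def pvT (metin : String) (j : Nat) : String :=
  if 2*j+1 < metin.toList.length then String.ofList [metin.toList.getD (2*j+1) default]
  else String.ofList [metin.toList.getD (2*(metin.toList.length - 1 - j)) default]

-- a buffer holding pvT everywhere joins to the closed-form answer
theorem pv_join (metin : String) (S : List String)
    (hl : S.length = metin.toList.length)
    (hv : ∀ j, j < metin.toList.length → S.getD j "" = pvT metin j) :
    (PySem.Str.join "" S).toList = pvOdds metin.toList ++ (pvEvens metin.toList).reverse := by
  have hlo : (pvOdds metin.toList).length = metin.toList.length / 2 := by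
    simp [pvOdds]
  have hle : (pvEvens metin.toList).length = (metin.toList.length + 1) / 2 := by
    simp [pvEvens]
  have hS : S = (pvOdds metin.toList ++ (pvEvens metin.toList).reverse).map
      (fun c => String.ofList [c]) := by
    have hlr : ((pvOdds metin.toList ++ (pvEvens metin.toList).reverse).map
        (fun c => String.ofList [c])).length = metin.toList.length := by
      rw [List.length_map, List.length_append, List.length_reverse, hlo, hle]
      omega
    apply List.ext_getElem (by omega)
    intro i h1 h2
    rw [hlr] at h2
    have hi : i < metin.toList.length := by omega
    have hval := hv i hi
    rw [List.getD_eq_getElem S "" h1] at hval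
    rw [hval]
    unfold pvT
    rw [List.getElem_map]
    by_cases hfront : i < metin.toList.length / 2
    · rw [List.getElem_append_left (by rw [hlo]; omega)]
      unfold pvOdds
      rw [List.getElem_map, List.getElem_range]
      rw [if_pos (by omega)]
    · rw [List.getElem_append_right (by rw [hlo]; omega)]
      rw [if_neg (by omega)]
      rw [List.getElem_reverse]
      unfold pvEvens
      rw [List.getElem_map, List.getElem_range]
      simp only [List.length_map, List.length_range]
      rw [hlo]
      have hidx : 2 * ((metin.toList.length + 1) / 2 - 1 - (i - metin.toList.length / 2))
          = 2 * (metin.toList.length - 1 - i) := by omega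
      rw [hidx]
  rw [hS, PySem.Str.toList_join]
  have hsep : ("" : String).toList = [] := rfl
  rw [hsep, List.map_map]
  have : (String.toList ∘ fun c => String.ofList [c]) = (fun c => [c]) := by
    funext c; simp
  rw [this, PySem.Chars.join_nil_singletons]

def pvBody (metin : String) : List String → Int → List String := fun s i =>
  let n : Int := PySem.Str.len metin
  let s1 := if i < n then
      PySem.List.pySetD s (n - 1 - PySem.Int.floordiv i 2)
        (((PySem.Str.pyGet? metin i).map (fun c => String.ofList [c])).getD "")
    else s
  if i + 1 < n then
      PySem.List.pySetD s1 (PySem.Int.floordiv i 2)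
        (((PySem.Str.pyGet? metin (i+1)).map (fun c => String.ofList [c])).getD "")
    else s1

-- expected cell value after processing loop indices k ∈ [t, (n+1)/2)
def pvE (metin : String) (t : Nat) (s : List String) (j : Nat) : String :=
  let cs := metin.toList
  let n := cs.length
  if 2*j+1 < n ∧ t ≤ j then String.ofList [cs.getD (2*j+1) default]
  else if n/2 ≤ j ∧ j + t ≤ n - 1 then String.ofList [cs.getD (2*(n-1-j)) default]
  else s.getD j ""

theorem pv_inv (metin : String) (hn : 2 ≤ metin.toList.length)
    (d t : Nat) (hd : d = (metin.toList.length + 1)/2 - t) (ht : t ≤ (metin.toList.length + 1)/2)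
    (s : List String) (hs : s.length = metin.toList.length) :
    (((List.range' t d).map (fun k => ((2*k : Nat) : Int))).foldl (pvBody metin) s).length = metin.toList.length ∧
    ∀ j, j < metin.toList.length →
      (((List.range' t d).map (fun k => ((2*k : Nat) : Int))).foldl (pvBody metin) s).getD j "" = pvE metin t s j := by
  induction d generalizing t s with
  | zero =>
    simp only [List.range'_zero, List.map_nil, List.foldl_nil]
    refine ⟨hs, fun j hj => ?_⟩
    unfold pvE
    rw [if_neg (by omega), if_neg (by omega)]
  | succ d ih =>
    set cs := metin.toList with hcs
    set n := cs.length with hnn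
    rw [List.range'_succ, List.map_cons, List.foldl_cons]
    have htm : t < (n+1)/2 := by omega
    have h2t : 2*t < n := by omega
    -- compute pvBody metin s ↑(2*t)
    have hflo : PySem.Int.floordiv ((2*t : Nat) : Int) 2 = (t : Int) := by
      rw [PySem.Int.floordiv_eq_ediv_of_pos (by norm_num)]; omega
    have hlen : PySem.Str.len metin = (n : Int) := PySem.Str.len_eq metin
    have hget : PySem.Str.pyGet? metin ((2*t : Nat) : Int) = some (cs.getD (2*t) default) := by
      rw [PySem.Str.pyGet?_natCast, List.getElem?_eq_getElem (by omega), List.getD_eq_getElem cs default (by omega)]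
    have hget1 : 2*t+1 < n → PySem.Str.pyGet? metin (((2*t : Nat) : Int) + 1) = some (cs.getD (2*t+1) default) := by
      intro hodd
      have h1 : ((2*t : Nat) : Int) + 1 = ((2*t+1 : Nat) : Int) := by push_cast; ring
      rw [h1, PySem.Str.pyGet?_natCast, List.getElem?_eq_getElem (by omega),
        List.getD_eq_getElem cs default (by omega)]
    have hbody : pvBody metin s ((2*t : Nat) : Int) =
        (if 2*t+1 < n then
          (s.set (n-1-t) (String.ofList [cs.getD (2*t) default])).set t (String.ofList [cs.getD (2*t+1) default])
        else s.set (n-1-t) (String.ofList [cs.getD (2*t) default])) := by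
      unfold pvBody
      rw [hlen]
      have htoNat : ((n : Int) - 1 - (t : Int)).toNat = n - 1 - t := by omega
      by_cases hodd : 2*t+1 < n
      · rw [if_pos (show ((2*t : Nat) : Int) + 1 < (n:Int) by exact_mod_cast hodd)]
        rw [if_pos (show ((2*t : Nat) : Int) < (n:Int) by exact_mod_cast h2t)]
        rw [hget, hget1 hodd, hflo]
        rw [PySem.List.pySetD_of_nonneg _ _ (by omega), PySem.List.pySetD_of_nonneg _ _ (by omega)]
        rw [if_pos hodd, htoNat]
        simp
      · rw [if_neg (show ¬ (((2*t : Nat) : Int) + 1 < (n:Int)) by exact_mod_cast hodd)]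
        rw [if_pos (show ((2*t : Nat) : Int) < (n:Int) by exact_mod_cast h2t)]
        rw [hget, hflo]
        rw [PySem.List.pySetD_of_nonneg _ _ (by omega)]
        rw [if_neg hodd, htoNat]
        simp
    rw [hbody]
    have hslen : (if 2*t+1 < n then
          (s.set (n-1-t) (String.ofList [cs.getD (2*t) default])).set t (String.ofList [cs.getD (2*t+1) default])
        else s.set (n-1-t) (String.ofList [cs.getD (2*t) default])).length = n := by
      split_ifs <;> simp [hs]
    obtain ⟨ihl, ihe⟩ := ih (t+1) (by omega) (by omega) _ hslen
    refine ⟨ihl, fun j hj => ?_⟩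
    rw [ihe j hj]
    unfold pvE
    simp only [List.getD_eq_getElem?_getD]
    by_cases hset : 2*t+1 < n
    · rw [if_pos hset]
      simp only [List.getElem?_set, hs, List.length_set]
      by_cases c1 : 2*j+1 < n ∧ t+1 ≤ j
      · rw [if_pos c1, if_pos (by omega : 2*j+1 < n ∧ t ≤ j)]
      · rw [if_neg c1]
        by_cases c2 : n/2 ≤ j ∧ j + (t+1) ≤ n - 1
        · rw [if_pos c2, if_neg (by omega : ¬(2*j+1 < n ∧ t ≤ j)),
            if_pos (by omega : n/2 ≤ j ∧ j + t ≤ n - 1)]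
        · rw [if_neg c2]
          by_cases cj : t = j
          · rw [if_pos cj, if_pos (by omega), if_pos (by omega : 2*j+1 < n ∧ t ≤ j)]
            simp only [Option.getD_some]
            have : 2*j+1 = 2*t+1 := by omega
            rw [this]
          · rw [if_neg cj]
            by_cases cj2 : n-1-t = j
            · rw [if_pos cj2, if_pos (by omega),
                if_neg (by omega : ¬(2*j+1 < n ∧ t ≤ j)),
                if_pos (by omega : n/2 ≤ j ∧ j + t ≤ n - 1)]
              simp only [Option.getD_some]
              have : 2*(n-1-j) = 2*t := by omega
              rw [this]
            · rw [if_neg cj2, if_neg (by omega : ¬(2*j+1 < n ∧ t ≤ j)),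
                if_neg (by omega : ¬(n/2 ≤ j ∧ j + t ≤ n - 1))]
    · rw [if_neg hset]
      simp only [List.getElem?_set, hs]
      by_cases c1 : 2*j+1 < n ∧ t+1 ≤ j
      · rw [if_pos c1, if_pos (by omega : 2*j+1 < n ∧ t ≤ j)]
      · rw [if_neg c1]
        by_cases c2 : n/2 ≤ j ∧ j + (t+1) ≤ n - 1
        · rw [if_pos c2, if_neg (by omega : ¬(2*j+1 < n ∧ t ≤ j)),
            if_pos (by omega : n/2 ≤ j ∧ j + t ≤ n - 1)]
        · rw [if_neg c2]
          by_cases cj2 : n-1-t = j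
          · rw [if_pos cj2, if_pos (by omega),
              if_neg (by omega : ¬(2*j+1 < n ∧ t ≤ j)),
              if_pos (by omega : n/2 ≤ j ∧ j + t ≤ n - 1)]
            simp only [Option.getD_some]
            have : 2*(n-1-j) = 2*t := by omega
            rw [this]
          · rw [if_neg cj2, if_neg (by omega : ¬(2*j+1 < n ∧ t ≤ j)),
              if_neg (by omega : ¬(n/2 ≤ j ∧ j + t ≤ n - 1))]

theorem pv_a_toList (metin : String) :
    (bir_son_bir_bas_tersi metin).toList = pvOdds metin.toList ++ (pvEvens metin.toList).reverse := by
  by_cases hsmall : metin.toList.length ≤ 1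
  · have hg : PySem.Str.len metin ≤ 1 := by
      rw [PySem.Str.len_eq]; exact_mod_cast hsmall
    unfold bir_son_bir_bas_tersi
    rw [if_pos hg]
    match hM : metin.toList with
    | [] => simp [pvOdds, pvEvens]
    | [c] => simp [pvOdds, pvEvens]
    | c :: d :: rest => rw [hM] at hsmall; simp at hsmall
  · have hn : 2 ≤ metin.toList.length := by omega
    have hg : ¬ (PySem.Str.len metin ≤ 1) := by
      rw [PySem.Str.len_eq]
      exact fun h => hsmall (by exact_mod_cast h)
    -- unfold A to an expression over pvBody (definitionally equal)
    have hA : bir_son_bir_bas_tersi metin =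
        (if PySem.Str.len metin ≤ 1 then metin else
          PySem.Str.join ""
            (if PySem.Int.mod (PySem.Str.len metin) 2 = 1 then
              PySem.List.pySetD
                ((PySem.List.pyRange 0 (PySem.Str.len metin) 2).foldl (pvBody metin)
                  (List.replicate (PySem.Str.len metin).toNat ""))
                (PySem.Int.floordiv (PySem.Str.len metin) 2)
                (((PySem.Str.pyGet? metin (PySem.Str.len metin - 1)).map
                  (fun c => String.ofList [c])).getD "")
            else
              (PySem.List.pyRange 0 (PySem.Str.len metin) 2).foldl (pvBody metin)
                (List.replicate (PySem.Str.len metin).toNat ""))) := rfl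
    rw [hA, if_neg hg, PySem.Str.len_eq]
    have htn : ((metin.toList.length : Int)).toNat = metin.toList.length := by omega
    rw [htn]
    have hrange : PySem.List.pyRange 0 ((metin.toList.length : Int)) 2 =
        (List.range' 0 ((metin.toList.length + 1)/2)).map (fun k => ((2*k : Nat) : Int)) := by
      rw [PySem.List.pyRange_of_pos 0 ((metin.toList.length : Int)) (by norm_num)]
      have hc : (if (0:Int) < (metin.toList.length : Int)
            then (((metin.toList.length : Int) - 0 + 2 - 1) / 2).toNat else 0)
          = (metin.toList.length + 1)/2 := by
        split_ifs <;> omega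
      rw [hc, List.range_eq_range']
      apply List.map_congr_left
      intro k _
      push_cast
      ring
    rw [hrange]
    obtain ⟨hlen1, hget1⟩ := pv_inv metin hn ((metin.toList.length + 1)/2) 0 (by omega) (by omega)
      (List.replicate metin.toList.length "") (by simp)
    have hval1 : ∀ j, j < metin.toList.length →
        (((List.range' 0 ((metin.toList.length + 1)/2)).map (fun k => ((2*k : Nat) : Int))).foldl
          (pvBody metin) (List.replicate metin.toList.length "")).getD j "" = pvT metin j := by
      intro j hj
      rw [hget1 j hj]
      unfold pvE pvT
      by_cases hf : 2*j+1 < metin.toList.length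
      · rw [if_pos (by omega : 2*j+1 < metin.toList.length ∧ 0 ≤ j), if_pos hf]
      · rw [if_neg (by omega : ¬(2*j+1 < metin.toList.length ∧ 0 ≤ j)),
          if_pos (by omega : metin.toList.length/2 ≤ j ∧ j + 0 ≤ metin.toList.length - 1),
          if_neg hf]
    have hmod : PySem.Int.mod ((metin.toList.length : Int)) 2 = ((metin.toList.length % 2 : Nat) : Int) := by
      rw [PySem.Int.mod_eq_emod_of_pos (b := 2) (by norm_num)]
      omega
    by_cases hpar : metin.toList.length % 2 = 1
    · rw [if_pos (by rw [hmod]; exact_mod_cast hpar)]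
      have hflo : PySem.Int.floordiv ((metin.toList.length : Int)) 2 = ((metin.toList.length / 2 : Nat) : Int) := by
        rw [PySem.Int.floordiv_eq_ediv_of_pos (by norm_num)]
        omega
      have hgetl : PySem.Str.pyGet? metin ((metin.toList.length : Int) - 1)
          = some (metin.toList.getD (metin.toList.length - 1) default) := by
        have hcast : ((metin.toList.length : Int) - 1) = ((metin.toList.length - 1 : Nat) : Int) := by omega
        rw [hcast, PySem.Str.pyGet?_natCast, List.getElem?_eq_getElem (by omega),
          List.getD_eq_getElem metin.toList default (by omega)]
      rw [hflo, hgetl, PySem.List.pySetD_of_nonneg _ _ (by omega)]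
      have htn2 : (((metin.toList.length / 2 : Nat) : Int)).toNat = metin.toList.length / 2 := by omega
      rw [htn2]
      apply pv_join metin
      · rw [List.length_set]; exact hlen1
      · intro j hj
        rw [List.getD_eq_getElem?_getD, List.getElem?_set]
        by_cases hmid : metin.toList.length / 2 = j
        · rw [if_pos hmid, if_pos (by omega : metin.toList.length / 2 < _ )]
          simp only [Option.map_some, Option.getD_some]
          unfold pvT
          rw [if_neg (by omega)]
          have hix : 2 * (metin.toList.length - 1 - j) = metin.toList.length - 1 := by omega
          rw [hix]
        · rw [if_neg hmid]
          rw [← List.getD_eq_getElem?_getD]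
          exact hval1 j hj
    · rw [if_neg (by rw [hmod]; exact_mod_cast hpar)]
      exact pv_join metin _ hlen1 hval1

-- ===== VERDICT (by name: the statement is the Claim_ definition above) =====
theorem bir_son_bir_bas_tersi_spec : Claim_equal_bir_son_bir_bas_tersi := by
  intro metin _
  unfold Spec_bir_son_bir_bas_tersi
  exact String.toList_inj.mp ((pv_a_toList metin).trans (pv_alt_toList metin).symm)
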